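-- pv_equiv track=rewrite | github.com/samnjab/ALU_logisim | test_2.py | op5_test
-- ===== SOURCE A (Python) =====
-- def DecimalToBinary(num: int, bits: int) -> str:
--     """Turns a decimal number into a binary string with a fixed number of bits."""
--     return format(num, f'0{bits}b')  # Converts to binary and pads with leading zeros
--
-- def concatenate(a: int, b: int) -> str:
--     """Concatenates two 4-bit binary numbers into an 8-bit binary string."""
--     return DecimalToBinary(a, 4) + DecimalToBinary(b, 4)
--
-- def op5_test(A: list, B: list) -> list[list]:
--     """Returns a matrix to test op5 with 4-bit inputs and 8-bit outputs."""
--     matrix = []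
--     for a in A:
--         for b in B:
--             row = []
--             row.append(DecimalToBinary(a, 4))  # A in 4-bit binary
--             row.append(DecimalToBinary(b, 4))  # B in 4-bit binary
--             row.append(concatenate(a, b))      # Concatenated 8-bit result
--             matrix.append(row)
--     return matrix
-- ===== SOURCE B (Python) =====
-- def op5_test(A: list, B: list) -> list[list]:
--     """Returns a matrix to test op5 with 4-bit inputs and 8-bit outputs."""
--     nB = len(B)
--     matrix = []
--     for k in range(len(A) * nB):
--         x = format(A[k // nB], '04b')
--         y = format(B[k % nB], '04b')
--         matrix.append([x, y, x + y])
--     return matrix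
-- ===== Notes on version B (the rewrite author's own statement) =====
-- stated objective: alternative
-- what changed: B replaces the nested loops over A and B by a single flat loop over the index range 0..len(A)*len(B), recovering each pair via divmod-style index arithmetic (k // len(B), k % len(B)) and assembling the 8-bit column by concatenating the two 4-bit strings.
import Mathlib
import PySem

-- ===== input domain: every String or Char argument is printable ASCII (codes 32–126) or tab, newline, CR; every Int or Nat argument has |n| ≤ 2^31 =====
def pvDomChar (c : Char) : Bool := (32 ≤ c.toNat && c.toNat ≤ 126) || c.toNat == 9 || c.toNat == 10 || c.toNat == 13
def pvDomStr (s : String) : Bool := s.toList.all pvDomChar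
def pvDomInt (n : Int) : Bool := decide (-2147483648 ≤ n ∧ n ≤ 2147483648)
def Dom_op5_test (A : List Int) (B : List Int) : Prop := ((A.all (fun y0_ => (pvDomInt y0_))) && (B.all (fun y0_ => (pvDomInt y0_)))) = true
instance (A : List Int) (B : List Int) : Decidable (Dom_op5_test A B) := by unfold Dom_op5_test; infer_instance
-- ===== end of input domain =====

-- B replaces A's nested loops by a single flat loop over range(len(A)*len(B)) with divmod index arithmetic (alternative decomposition, same cost).
-- ===== PORT A =====
def DecimalToBinary (num : Int) (bits : Int) : String :=
  PySem.Str.zfill (PySem.Int.toBin num) bits   -- format(num, f'0{bits}b')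

def concatenate (a : Int) (b : Int) : String :=
  DecimalToBinary a 4 ++ DecimalToBinary b 4

def op5_test (A : List Int) (B : List Int) : List (List String) :=
  A.foldl (fun matrix a =>
    B.foldl (fun matrix b =>
      matrix ++ [[DecimalToBinary a 4, DecimalToBinary b 4, concatenate a b]]) matrix) []

-- ===== PORT B =====
def fmt4 (n : Int) : String := PySem.Str.zfill (PySem.Int.toBin n) 4   -- format(n, '04b')

def op5_test_alt (A : List Int) (B : List Int) : List (List String) :=
  let nB : Int := B.length
  (PySem.List.pyRange 0 (A.length * nB) 1).foldl (fun matrix k =>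
    let x := fmt4 (PySem.List.pyGetD A (PySem.Int.floordiv k nB) 0)
    let y := fmt4 (PySem.List.pyGetD B (PySem.Int.mod k nB) 0)
    matrix ++ [[x, y, x ++ y]]) []

-- ===== PRECONDITION & SPEC =====
def Spec_op5_test (A : List Int) (B : List Int) (out : List (List String)) : Prop := out = op5_test_alt A B
instance (A : List Int) (B : List Int) (out : List (List String)) : Decidable (Spec_op5_test A B out) := by unfold Spec_op5_test; infer_instance

-- ===== CLAIM (what is proved, stated in full; the proofs are below) =====
def Claim_equal_op5_test : Prop := ∀ (A : List Int) (B : List Int), Dom_op5_test A B → Spec_op5_test A B (op5_test A B)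

-- ===== LEMMAS AND PROOFS =====

-- A's nested foldl is the flatMap of rows.
lemma op5_inner (a : Int) (B : List Int) (acc : List (List String)) :
    B.foldl (fun matrix b =>
      matrix ++ [[DecimalToBinary a 4, DecimalToBinary b 4, concatenate a b]]) acc
    = acc ++ B.map (fun b => [fmt4 a, fmt4 b, fmt4 a ++ fmt4 b]) := by
  rw [PySem.List.foldl_append_singleton_eq_map]
  simp [DecimalToBinary, concatenate, fmt4]

lemma op5_outer (A B : List Int) (acc : List (List String)) :
    A.foldl (fun matrix a =>
      B.foldl (fun matrix b =>
        matrix ++ [[DecimalToBinary a 4, DecimalToBinary b 4, concatenate a b]]) matrix) acc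
    = acc ++ A.flatMap (fun a => B.map (fun b => [fmt4 a, fmt4 b, fmt4 a ++ fmt4 b])) := by
  induction A generalizing acc with
  | nil => simp
  | cons a A ih => rw [List.foldl_cons, op5_inner, ih]; simp

-- one block of B's flat loop (indices c*|B| .. (c+1)*|B|) yields one row group of B.
lemma op5_block (g : Int → List String) (B : List Int) (c : Int) (hn : 0 < (B.length : Int)) :
    (PySem.List.pyRange (c * (B.length : Int)) ((c + 1) * (B.length : Int)) 1).map
      (fun k => g (PySem.List.pyGetD B (PySem.Int.mod k (B.length : Int)) 0))
    = B.map g := by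
  conv_rhs => rw [← PySem.List.map_pyGetD_pyRange_zero (xs := B) (d := 0)]
  rw [List.map_map, PySem.List.pyRange_one (c * (B.length : Int)) ((c + 1) * (B.length : Int)),
      PySem.List.pyRange_zero, List.map_map]
  have hlen : ((c + 1) * (B.length : Int) - c * (B.length : Int)).toNat = B.length := by
    have h : (c + 1) * (B.length : Int) - c * (B.length : Int) = (B.length : Int) := by ring
    rw [h]; exact Int.toNat_natCast _
  rw [hlen]
  simp only [PySem.List.len_eq, Int.toNat_natCast, List.map_map]
  refine List.map_congr_left (fun j hj => ?_)
  have hj' : j < B.length := List.mem_range.1 hj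
  have hmod : PySem.Int.mod (c * (B.length : Int) + (j : Int)) (B.length : Int) = (j : Int) := by
    have h2 : c * (B.length : Int) + (j : Int) = (j : Int) + (B.length : Int) * c := by ring
    rw [PySem.Int.mod_eq_emod_of_pos hn, h2, Int.add_mul_emod_self_left,
        Int.emod_eq_of_lt (by positivity) (by exact_mod_cast hj')]
  simp [hmod]

-- B's flat index loop produces the same flatMap, by reverse induction on A.
lemma op5_flat (A B : List Int) :
    (PySem.List.pyRange 0 (A.length * (B.length : Int)) 1).map (fun k =>
        [fmt4 (PySem.List.pyGetD A (PySem.Int.floordiv k B.length) 0),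
         fmt4 (PySem.List.pyGetD B (PySem.Int.mod k B.length) 0),
         fmt4 (PySem.List.pyGetD A (PySem.Int.floordiv k B.length) 0)
           ++ fmt4 (PySem.List.pyGetD B (PySem.Int.mod k B.length) 0)])
    = A.flatMap (fun a => B.map (fun b => [fmt4 a, fmt4 b, fmt4 a ++ fmt4 b])) := by
  rcases eq_or_ne B [] with rfl | hB
  · simp [PySem.List.pyRange_one_eq_nil]
  · have hn : 0 < ((B.length : Int)) := by
      exact_mod_cast List.length_pos_iff.2 hB
    induction A using List.reverseRecOn with
    | nil => simp [PySem.List.pyRange_one_eq_nil]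
    | append_singleton A a ih =>
      have hc : (((A ++ [a]).length : Int)) * (B.length : Int)
          = ((A.length : Int) + 1) * (B.length : Int) := by
        push_cast [List.length_append, List.length_singleton]; ring
      rw [hc, PySem.List.pyRange_one_append 0 ((A.length : Int) * (B.length : Int))
            (((A.length : Int) + 1) * (B.length : Int))
            (by positivity) (by nlinarith), List.map_append]
      have h1 : ∀ k ∈ PySem.List.pyRange 0 ((A.length : Int) * (B.length : Int)) 1,
          PySem.List.pyGetD (A ++ [a]) (PySem.Int.floordiv k (B.length : Int)) 0
            = PySem.List.pyGetD A (PySem.Int.floordiv k (B.length : Int)) 0 := by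
        intro k hk
        have hk' := PySem.List.mem_pyRange_one.1 hk
        have hdivlt : PySem.Int.floordiv k (B.length : Int) < (A.length : Int) :=
          (PySem.Int.floordiv_lt_iff_lt_mul hn).2 (by linarith [hk'.2])
        have hdivnn : (0 : Int) ≤ PySem.Int.floordiv k (B.length : Int) :=
          (PySem.Int.le_floordiv_iff_mul_le hn).2 (by linarith [hk'.1])
        have hlt : (PySem.Int.floordiv k (B.length : Int)).toNat < A.length := by omega
        rw [PySem.List.pyGetD_eq_getElem _ _ hdivnn (by simp; omega),
            PySem.List.pyGetD_eq_getElem _ _ hdivnn (by exact_mod_cast hdivlt),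
            List.getElem_append_left hlt]
      have h2 : ∀ k ∈ PySem.List.pyRange ((A.length : Int) * (B.length : Int))
            (((A.length : Int) + 1) * (B.length : Int)) 1,
          PySem.List.pyGetD (A ++ [a]) (PySem.Int.floordiv k (B.length : Int)) 0 = a := by
        intro k hk
        have hk' := PySem.List.mem_pyRange_one.1 hk
        have hdiv : PySem.Int.floordiv k (B.length : Int) = (A.length : Int) :=
          (PySem.Int.floordiv_eq_iff_of_pos hn).2 ⟨hk'.1, hk'.2⟩
        rw [hdiv, PySem.List.pyGetD_eq_getElem _ _ (by positivity) (by simp)]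
        have ht : ((A.length : Int)).toNat = A.length := Int.toNat_natCast _
        simp [ht]
      rw [List.map_congr_left (fun k hk => by rw [h1 k hk]), ih,
          List.map_congr_left (fun k hk => by rw [h2 k hk]),
          op5_block (fun b => [fmt4 a, fmt4 b, fmt4 a ++ fmt4 b]) B (A.length : Int) hn]
      simp

-- ===== VERDICT (by name: the statement is the Claim_ definition above) =====
theorem op5_test_spec : Claim_equal_op5_test := by
  intro A B _
  unfold Spec_op5_test op5_test op5_test_alt
  rw [op5_outer, PySem.List.foldl_append_singleton_eq_map, op5_flat]
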